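-- pv_equiv track=rewrite | github.com/sqrtspace/sqrtspace-tools | explorer/spacetime_explorer.py | _calculate_data_distribution
-- ===== SOURCE A (Python) =====
-- from typing import Dict, List, Tuple, Optional, Any
--
-- def _calculate_data_distribution(data_size: int,
--                                memory_sizes: List[int]) -> List[float]:
--     """Calculate how data is distributed across memory hierarchy"""
--     distribution = []
--     remaining = data_size
--
--     for size in memory_sizes:
--         if remaining <= 0:
--             distribution.append(0)
--         elif remaining <= size:
--             distribution.append(remaining)
--             remaining = 0
--         else:
--             distribution.append(size)
--             remaining -= size
--
--     return distribution
-- ===== SOURCE B (Python) =====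
-- def _calculate_data_distribution(data_size, memory_sizes):
--     """Scan-and-difference: build the sequence of remaining amounts with a
--     branch-free step, then each level's share is the adjacent difference."""
--     rems = [data_size]
--     r = data_size
--     for s in memory_sizes:
--         r = r - min(r, s) if r > 0 else r
--         rems.append(r)
--     return [x - y for x, y in zip(rems, rems[1:])]
-- ===== Notes on version B (the rewrite author's own statement) =====
-- stated objective: alternative
-- what changed: B never builds the distribution directly: it scans the remaining-data sequence with a single branch-free step r -> r - min(r, s) (for r > 0), then recovers each level's share as the adjacent difference of consecutive remainders, replacing A's three-way if/elif/else and output accumulator.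
import Mathlib
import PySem

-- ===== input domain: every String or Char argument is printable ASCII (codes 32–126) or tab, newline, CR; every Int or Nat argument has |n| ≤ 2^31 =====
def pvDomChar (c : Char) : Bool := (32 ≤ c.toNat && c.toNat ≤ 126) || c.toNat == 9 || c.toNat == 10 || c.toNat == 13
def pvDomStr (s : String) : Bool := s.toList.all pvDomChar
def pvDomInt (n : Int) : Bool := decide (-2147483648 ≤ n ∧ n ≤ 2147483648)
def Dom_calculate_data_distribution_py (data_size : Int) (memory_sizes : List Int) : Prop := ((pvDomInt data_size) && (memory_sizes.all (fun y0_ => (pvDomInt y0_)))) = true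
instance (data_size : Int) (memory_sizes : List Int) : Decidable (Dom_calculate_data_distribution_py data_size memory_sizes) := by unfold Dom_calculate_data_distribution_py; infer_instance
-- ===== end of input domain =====

-- B replaces A's three-way branch and output accumulator by a scan of the remaining-data
-- sequence followed by adjacent differencing (alternative decomposition, same O(n) cost).


-- ===== PORT A =====
def calculate_data_distribution_py (data_size : Int) (memory_sizes : List Int) : List Int :=
  (memory_sizes.foldl (fun (st : List Int × Int) size =>
    let distribution := st.1
    let remaining := st.2
    if remaining ≤ 0 then (distribution ++ [0], remaining)
    else if remaining ≤ size then (distribution ++ [remaining], 0)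
    else (distribution ++ [size], remaining - size)) ([], data_size)).1

-- ===== PORT B =====
-- the branch-free step of Source B's loop: r = r - min(r, s) if r > 0 else r
def pvStepB (r s : Int) : Int := if r > 0 then r - min r s else r

def calculate_data_distribution_py_alt (data_size : Int) (memory_sizes : List Int) : List Int :=
  let rems := (memory_sizes.foldl (fun (st : List Int × Int) s =>
    let r := pvStepB st.2 s
    (st.1 ++ [r], r)) ([data_size], data_size)).1
  List.zipWith (fun x y => x - y) rems rems.tail

-- ===== PRECONDITION & SPEC =====
def Spec_calculate_data_distribution_py (data_size : Int) (memory_sizes : List Int) (out : List Int) : Prop := out = calculate_data_distribution_py_alt data_size memory_sizes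
instance (data_size : Int) (memory_sizes : List Int) (out : List Int) : Decidable (Spec_calculate_data_distribution_py data_size memory_sizes out) := by unfold Spec_calculate_data_distribution_py; infer_instance

-- ===== CLAIM (what is proved, stated in full; the proofs are below) =====
def Claim_equal_calculate_data_distribution_py : Prop := ∀ (data_size : Int) (memory_sizes : List Int), Dom_calculate_data_distribution_py data_size memory_sizes → Spec_calculate_data_distribution_py data_size memory_sizes (calculate_data_distribution_py data_size memory_sizes)

-- ===== LEMMAS AND PROOFS =====

-- recursive characterisation of A's loop
def pvGoA (r : Int) : List Int → List Int
  | [] => []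
  | s :: rest =>
      if r ≤ 0 then 0 :: pvGoA r rest
      else if r ≤ s then r :: pvGoA 0 rest
      else s :: pvGoA (r - s) rest

-- tail of B's remaining-sequence, recursively
def pvScanT (r : Int) : List Int → List Int
  | [] => []
  | s :: rest => pvStepB r s :: pvScanT (pvStepB r s) rest

theorem pvA_foldl (l : List Int) (acc : List Int) (r : Int) :
    (l.foldl (fun (st : List Int × Int) size =>
      if st.2 ≤ 0 then (st.1 ++ [0], st.2)
      else if st.2 ≤ size then (st.1 ++ [st.2], 0)
      else (st.1 ++ [size], st.2 - size)) (acc, r)).1 = acc ++ pvGoA r l := by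
  induction l generalizing acc r with
  | nil => simp [pvGoA]
  | cons s rest ih =>
      simp only [List.foldl_cons, pvGoA]
      split_ifs <;> simp [ih]

theorem pvB_foldl (l : List Int) (acc : List Int) (r : Int) :
    (l.foldl (fun (st : List Int × Int) s =>
      (st.1 ++ [pvStepB st.2 s], pvStepB st.2 s)) (acc, r)).1 = acc ++ pvScanT r l := by
  induction l generalizing acc r with
  | nil => simp [pvScanT]
  | cons s rest ih => simp [List.foldl_cons, pvScanT, ih]

theorem pv_diff_eq_goA (l : List Int) (r : Int) :
    List.zipWith (fun x y => x - y) (r :: pvScanT r l) (pvScanT r l) = pvGoA r l := by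
  induction l generalizing r with
  | nil => simp [pvScanT, pvGoA]
  | cons s rest ih =>
      simp only [pvScanT, pvGoA, List.zipWith]
      by_cases h1 : r ≤ 0
      · have hs : pvStepB r s = r := by simp [pvStepB]; omega
        rw [hs]
        simp [ih]
        exact fun h => absurd h (by omega)
      · by_cases h2 : r ≤ s
        · have hs : pvStepB r s = 0 := by
            simp [pvStepB, min_def]
            omega
          rw [hs]
          simp [h1, h2, ih]
        · have hs : pvStepB r s = r - s := by
            simp [pvStepB, min_def]
            omega
          rw [hs]
          simp [h1, h2, ih]

-- ===== VERDICT (by name: the statement is the Claim_ definition above) =====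
theorem calculate_data_distribution_py_spec : Claim_equal_calculate_data_distribution_py := by
  intro data_size memory_sizes _
  unfold Spec_calculate_data_distribution_py
  unfold calculate_data_distribution_py calculate_data_distribution_py_alt
  rw [show (fun (st : List Int × Int) size =>
        let distribution := st.1
        let remaining := st.2
        if remaining ≤ 0 then (distribution ++ [0], remaining)
        else if remaining ≤ size then (distribution ++ [remaining], 0)
        else (distribution ++ [size], remaining - size)) =
      (fun (st : List Int × Int) size =>
        if st.2 ≤ 0 then (st.1 ++ [0], st.2)
        else if st.2 ≤ size then (st.1 ++ [st.2], 0)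
        else (st.1 ++ [size], st.2 - size)) from rfl]
  rw [show (fun (st : List Int × Int) s =>
        let r := pvStepB st.2 s
        (st.1 ++ [r], r)) =
      (fun (st : List Int × Int) s =>
        (st.1 ++ [pvStepB st.2 s], pvStepB st.2 s)) from rfl]
  rw [pvA_foldl, pvB_foldl]
  simp only [List.nil_append, List.singleton_append, List.tail_cons]
  exact (pv_diff_eq_goA memory_sizes data_size).symm
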